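-- pv_equiv track=rewrite | github.com/derrickdollesin/DSC20 | Homework/hw06/hw06.py | seating_chart
-- ===== SOURCE A (Python) =====
-- def seating_chart(group_sizes, table_sizes):
--     """
--     Determines how many more tables are needed to fit every group
--
--     Args:
--         group_sizes: a list of integers, where every integer represents the
--                      size of a group
--         tables_sizes: a list of intergers, where every integer represents the
--                       total number of seats at the tables
--
--     Returns:
--         the number of groups that are assigned to a table that does not have
--         enough seats for everyone at the table
--
--     >>> seating_chart([3, 3, 3], [4, 4, 4])
--     0
--     >>> seating_chart([2, 3, 4, 5], [3, 3, 3])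
--     2
--     >>> seating_chart([2, 2], [])
--     2
--
--     # Add your own doctests below
--
--     >>> seating_chart([5, 4, 3], [5, 4, 3])
--     0
--     >>> seating_chart([5, 10], [6, 3])
--     1
--     >>> seating_chart([1, 1, 1, 1], [1, 1, 1, 1])
--     0
--
--     """
--     if not group_sizes:
--         return 0
--
--     group_size = group_sizes[0]
--
--     for table_size in table_sizes:
--         if group_size <= table_size:
--             return seating_chart(group_sizes[1:], table_sizes)
--
--     return 1 + seating_chart(group_sizes[1:], table_sizes)
-- ===== SOURCE B (Python) =====
-- def seating_chart(group_sizes, table_sizes):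
--     if not table_sizes:
--         return len(group_sizes)
--     best = max(table_sizes)
--     return sum(1 for g in group_sizes if g > best)
-- ===== Notes on version B (the rewrite author's own statement) =====
-- stated objective: faster
-- what changed: Replaces A's recursion over groups with a nested rescan of all tables per group by a single max(table_sizes) precomputation followed by one counting pass over group_sizes.
import Mathlib
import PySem

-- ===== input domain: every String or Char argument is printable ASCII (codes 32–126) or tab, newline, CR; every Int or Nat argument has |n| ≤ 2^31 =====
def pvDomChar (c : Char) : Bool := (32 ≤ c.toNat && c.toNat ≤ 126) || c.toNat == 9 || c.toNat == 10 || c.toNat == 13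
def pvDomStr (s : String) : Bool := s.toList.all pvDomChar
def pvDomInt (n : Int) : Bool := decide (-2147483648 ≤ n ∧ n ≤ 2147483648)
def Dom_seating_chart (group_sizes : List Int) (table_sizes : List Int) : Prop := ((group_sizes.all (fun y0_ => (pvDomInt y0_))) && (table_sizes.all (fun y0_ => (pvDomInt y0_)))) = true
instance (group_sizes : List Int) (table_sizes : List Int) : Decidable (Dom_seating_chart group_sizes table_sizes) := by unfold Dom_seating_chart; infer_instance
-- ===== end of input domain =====

-- B replaces A's per-group recursion that rescans all tables with one max(table_sizes) precomputation and a single counting pass (objective: faster).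


-- ===== PORT A =====
-- the "for table_size in table_sizes: if group_size <= table_size: return …" loop
def pvFits (g : Int) : List Int → Bool
  | [] => false
  | t :: ts => if g ≤ t then true else pvFits g ts

def seating_chart (group_sizes : List Int) (table_sizes : List Int) : Int :=
  match group_sizes with
  | [] => 0
  | g :: rest =>
    if pvFits g table_sizes then seating_chart rest table_sizes
    else 1 + seating_chart rest table_sizes

-- ===== PORT B =====
def seating_chart_alt (group_sizes : List Int) (table_sizes : List Int) : Int :=
  match table_sizes with
  | [] => (group_sizes.length : Int)
  | t :: ts =>
    let best := List.foldl max t ts   -- max(table_sizes)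
    ((group_sizes.filter (fun g => decide (best < g))).length : Int)

-- ===== PRECONDITION & SPEC =====
def Spec_seating_chart (group_sizes : List Int) (table_sizes : List Int) (out : Int) : Prop := out = seating_chart_alt group_sizes table_sizes
instance (group_sizes : List Int) (table_sizes : List Int) (out : Int) : Decidable (Spec_seating_chart group_sizes table_sizes out) := by unfold Spec_seating_chart; infer_instance

-- ===== CLAIM (what is proved, stated in full; the proofs are below) =====
def Claim_equal_seating_chart : Prop := ∀ (group_sizes : List Int) (table_sizes : List Int), Dom_seating_chart group_sizes table_sizes → Spec_seating_chart group_sizes table_sizes (seating_chart group_sizes table_sizes)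

-- ===== LEMMAS AND PROOFS =====
theorem pvFits_iff (g : Int) (l : List Int) : pvFits g l = true ↔ ∃ t ∈ l, g ≤ t := by
  induction l with
  | nil => simp [pvFits]
  | cons t ts ih =>
    simp only [pvFits]
    by_cases h : g ≤ t
    · simp [h]
    · simp [h, ih]

theorem pvFits_max (g t : Int) (ts : List Int) :
    pvFits g (t :: ts) = decide (g ≤ List.foldl max t ts) := by
  have hb := PySem.List.le_foldl_max ts t
  have hm := PySem.List.foldl_max_mem ts t
  by_cases h : g ≤ List.foldl max t ts
  · simp only [h, decide_true]
    rw [pvFits_iff]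
    rcases hm with hm | hm
    · exact ⟨t, by simp, hm ▸ h⟩
    · exact ⟨_, by simp [hm], h⟩
  · simp only [h, decide_false]
    rw [Bool.eq_false_iff, Ne, pvFits_iff]
    rintro ⟨x, hx, hgx⟩
    apply h
    rcases List.mem_cons.mp hx with rfl | hx
    · exact le_trans hgx hb.1
    · exact le_trans hgx (hb.2 x hx)

theorem seating_nil (gs : List Int) : seating_chart gs [] = (gs.length : Int) := by
  induction gs with
  | nil => rfl
  | cons g rest ih => simp [seating_chart, pvFits, ih]; omega

theorem seating_cons (gs : List Int) (t : Int) (ts : List Int) :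
    seating_chart gs (t :: ts)
      = ((gs.filter (fun g => decide (List.foldl max t ts < g))).length : Int) := by
  induction gs with
  | nil => rfl
  | cons g rest ih =>
    simp only [seating_chart, ih, pvFits_max, List.filter_cons]
    by_cases h : g ≤ List.foldl max t ts
    · simp [h, not_lt.mpr h]
    · simp [h, lt_of_not_ge h]
      omega

-- ===== VERDICT (by name: the statement is the Claim_ definition above) =====
theorem seating_chart_spec : Claim_equal_seating_chart := by
  intro gs ts _
  unfold Spec_seating_chart seating_chart_alt
  cases ts with
  | nil => exact seating_nil gs
  | cons t ts => exact seating_cons gs t ts
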